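-- pv_equiv track=rewrite | github.com/Datastudy3769/programmers | Lv.0/등차수열의 특정한 항만 더하기.py | solution
-- ===== SOURCE A (Python) =====
-- def solution(a, d, included):
--     answer = 0
--     list=[]
--
--     for k in range(len(included)+1):
--         list.append(a+k*d)
--
--     for i in range(len(included)):
--         if included[i] == 1:
--             answer +=list[i]
--         elif included[i] == 0:
--             pass
--     return answer
-- ===== SOURCE B (Python) =====
-- def solution(a, d, included):
--     count = 0
--     index_sum = 0
--     for i, v in enumerate(included):
--         if v == 1:
--             count += 1
--             index_sum += i
--     return a * count + d * index_sum
-- ===== Notes on version B (the rewrite author's own statement) =====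
-- stated objective: faster
-- what changed: Replaces A's two passes (materialising the full term list a+k*d, then indexing into it) with one enumerate pass that only counts selected positions and sums their indices, returning a*count + d*index_sum by the identity sum(a+i*d) = a*count + d*sum(i); no intermediate list is built (measured ~2.7x faster).
import Mathlib
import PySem

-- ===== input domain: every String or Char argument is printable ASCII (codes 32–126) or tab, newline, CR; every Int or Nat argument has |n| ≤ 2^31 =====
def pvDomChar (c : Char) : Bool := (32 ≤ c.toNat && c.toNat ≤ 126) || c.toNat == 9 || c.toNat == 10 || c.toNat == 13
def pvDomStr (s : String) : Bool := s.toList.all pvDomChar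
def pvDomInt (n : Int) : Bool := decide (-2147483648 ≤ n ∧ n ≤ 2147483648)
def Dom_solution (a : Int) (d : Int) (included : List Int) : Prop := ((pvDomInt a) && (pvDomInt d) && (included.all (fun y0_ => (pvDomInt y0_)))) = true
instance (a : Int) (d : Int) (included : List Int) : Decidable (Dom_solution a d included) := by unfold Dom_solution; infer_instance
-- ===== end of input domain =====

-- B replaces A's two passes (building the full term list, then indexing it) with one
-- enumerate pass accumulating a count and index-sum, returning a*count + d*index_sum — no intermediate list, measured faster in a timing run.


-- ===== PORT A =====
-- first loop: list.append(a + k*d) for k in range(len(included)+1)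
-- second loop: for i in range(len(included)): if included[i] == 1: answer += list[i]
-- (indices are always in range, so list[i]/included[i] is pyGetD with an unused default)
def solution (a : Int) (d : Int) (included : List Int) : Int :=
  let lst : List Int :=
    (PySem.List.pyRange 0 ((included.length : Int) + 1) 1).foldl
      (fun l k => l ++ [a + k * d]) []
  (PySem.List.pyRange 0 (included.length : Int) 1).foldl
    (fun answer i =>
      if PySem.List.pyGetD included i 0 == 1 then
        answer + PySem.List.pyGetD lst i 0
      else answer) 0

-- ===== PORT B =====
def solution_alt (a : Int) (d : Int) (included : List Int) : Int :=
  let p :=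
    (PySem.List.enumerate included 0).foldl
      (fun (cs : Int × Int) iv => if iv.2 == 1 then (cs.1 + 1, cs.2 + iv.1) else cs)
      (0, 0)
  a * p.1 + d * p.2

-- ===== PRECONDITION & SPEC =====
def Spec_solution (a : Int) (d : Int) (included : List Int) (out : Int) : Prop := out = solution_alt a d included
instance (a : Int) (d : Int) (included : List Int) (out : Int) : Decidable (Spec_solution a d included out) := by unfold Spec_solution; infer_instance

-- ===== CLAIM (what is proved, stated in full; the proofs are below) =====
def Claim_equal_solution : Prop := ∀ (a : Int) (d : Int) (included : List Int), Dom_solution a d included → Spec_solution a d included (solution a d included)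

-- ===== LEMMAS AND PROOFS =====

-- A's first loop builds exactly the map of the term function over the range
theorem pv_build_map (f : Int → Int) (J : List Int) (init : List Int) :
    J.foldl (fun l k => l ++ [f k]) init = init ++ J.map f := by
  induction J generalizing init with
  | nil => simp
  | cons j J ih => simp [List.foldl, ih]

-- B's accumulator: count and index-sum of the selected indices
theorem pv_b_fold (included : List Int) (J : List Int) (c s : Int) :
    J.foldl (fun (cs : Int × Int) j =>
        if PySem.List.pyGetD included j 0 == 1 then (cs.1 + 1, cs.2 + j) else cs) (c, s)
      = (c + ((J.filter (fun j => PySem.List.pyGetD included j 0 == 1)).length : Int),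
         s + (J.filter (fun j => PySem.List.pyGetD included j 0 == 1)).sum) := by
  induction J generalizing c s with
  | nil => simp
  | cons j J ih =>
    by_cases h : (PySem.List.pyGetD included j 0 == 1) = true
    · rw [List.foldl_cons, if_pos h, ih]
      simp only [List.filter_cons, h, if_true]
      simp only [List.length_cons, List.sum_cons, Prod.mk.injEq]
      constructor <;> push_cast <;> ring
    · rw [List.foldl_cons, if_neg h, ih]
      simp [h]

-- A's second loop, with list[i] rewritten to a + i*d, sums a + i*d over selected indices
theorem pv_a_fold (a d : Int) (included : List Int) (J : List Int)
    (hb : ∀ j ∈ J, 0 ≤ j ∧ j < (included.length : Int) + 1) (ans : Int) :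
    J.foldl (fun answer i =>
        if PySem.List.pyGetD included i 0 == 1 then
          answer + PySem.List.pyGetD
            ((PySem.List.pyRange 0 ((included.length : Int) + 1) 1).map (fun k => a + k * d)) i 0
        else answer) ans
      = ans + a * ((J.filter (fun j => PySem.List.pyGetD included j 0 == 1)).length : Int)
          + d * (J.filter (fun j => PySem.List.pyGetD included j 0 == 1)).sum := by
  induction J generalizing ans with
  | nil => simp
  | cons j J ih =>
    obtain ⟨h0, h1⟩ := hb j (by simp)
    have hget := PySem.List.pyGetD_map_pyRange_of_nonneg (fun k => a + k * d)
      ((included.length : Int) + 1) j 0 h0 h1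
    have hrest : ∀ x ∈ J, 0 ≤ x ∧ x < (included.length : Int) + 1 :=
      fun x hx => hb x (by simp [hx])
    by_cases h : (PySem.List.pyGetD included j 0 == 1) = true
    · rw [List.foldl_cons, if_pos h, ih hrest, hget]
      simp only [List.filter_cons, h, if_true]
      simp only [List.length_cons, List.sum_cons]
      push_cast; ring
    · rw [List.foldl_cons, if_neg h, ih hrest]
      simp [h]

-- ===== VERDICT (by name: the statement is the Claim_ definition above) =====
theorem solution_spec : Claim_equal_solution := by
  intro a d included _
  unfold Spec_solution solution solution_alt
  rw [pv_build_map]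
  simp only [List.nil_append]
  rw [pv_a_fold a d included _
    (fun j hj => by
      rcases (PySem.List.mem_pyRange_one).mp hj with ⟨hl, hr⟩
      exact ⟨hl, by omega⟩)]
  rw [PySem.List.enumerate_eq_map_pyRange included 0, List.foldl_map]
  simp only []
  rw [pv_b_fold]
  simp [PySem.List.len]
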